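-- pv_equiv track=rewrite | github.com/wjdengus98/Algorithms | 프로그래머스/2/42626. 더 맵게/더 맵게.py | solution
-- ===== SOURCE A (Python) =====
-- import heapq
--
-- def solution(scoville, K):
--     heapq.heapify(scoville)  # 최소 힙으로 변환
--     count = 0
--
--     while len(scoville) > 1:
--         if scoville[0] >= K:
--             return count
--
--         first = heapq.heappop(scoville)
--         second = heapq.heappop(scoville)
--
--         new_food = first + (second * 2)
--         heapq.heappush(scoville, new_food)
--
--         count += 1
--
--     # 마지막 음식 체크
--     if scoville[0] >= K:
--         return count
--     else:
--         return -1
-- ===== SOURCE B (Python) =====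
-- def solution(scoville, K):
--     foods = list(scoville)
--     count = 0
--     while len(foods) > 1:
--         first = min(foods)
--         if first >= K:
--             return count
--         foods.remove(first)
--         second = min(foods)
--         foods.remove(second)
--         foods.append(first + 2 * second)
--         count += 1
--     return count if foods[0] >= K else -1
-- ===== Notes on version B (the rewrite author's own statement) =====
-- stated objective: simpler
-- what changed: Drops the priority structure entirely: instead of a binary heap, B keeps a plain unordered list and each round finds the minimum by a linear scan (min), removes it, scans again for the second minimum, and appends the mix; it also leaves the caller's list unmutated (A heapifies it in place) while the return value is identical.
import Mathlib
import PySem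

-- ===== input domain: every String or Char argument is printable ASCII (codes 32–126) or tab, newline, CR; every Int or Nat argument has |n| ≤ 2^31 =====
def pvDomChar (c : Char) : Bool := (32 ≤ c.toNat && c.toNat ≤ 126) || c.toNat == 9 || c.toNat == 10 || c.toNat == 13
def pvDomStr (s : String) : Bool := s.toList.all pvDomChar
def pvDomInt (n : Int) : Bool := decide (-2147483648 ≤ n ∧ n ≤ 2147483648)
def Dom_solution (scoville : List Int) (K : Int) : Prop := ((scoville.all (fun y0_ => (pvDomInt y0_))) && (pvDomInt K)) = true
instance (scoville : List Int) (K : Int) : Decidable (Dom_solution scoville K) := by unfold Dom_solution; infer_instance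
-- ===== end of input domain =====

-- B keeps no priority structure at all: each round it finds the minimum of a plain
-- unordered list by a scan (min), removes it, scans again, and appends the mix
-- (objective: simpler). A heapifies its argument in place; B copies and never
-- mutates — the equivalence proved here is about the return value only.

-- ===== PORT A =====
-- heapq is ported as a meldable min-heap (skew heap): heapify = fold of pushes,
-- heappop reads the root and melds the children, heappush melds a singleton.
-- The internal array layout of CPython's heapq is not observable in the result.
-- The Nat arguments below are fuel: totality guards only, always supplied large
-- enough that the fuel-exhausted branches are unreachable.
inductive PHeap where
  | leaf : PHeap
  | node : Int → PHeap → PHeap → PHeap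
deriving DecidableEq, Repr

def PHeap.size : PHeap → Nat
  | .leaf => 0
  | .node _ a b => 1 + a.size + b.size

def PHeap.meld : Nat → PHeap → PHeap → PHeap
  | 0, h1, h2 =>   -- fuel exhausted: unreachable when fuel ≥ combined size
    match h1, h2 with
    | .leaf, h => h
    | h, _ => h
  | f + 1, h1, h2 =>
    match h1, h2 with
    | .leaf, h => h
    | h, .leaf => h
    | .node x a b, .node y c d =>
      if x ≤ y then .node x (PHeap.meld f b (.node y c d)) a
      else .node y (PHeap.meld f d (.node x a b)) c
termination_by structural f _ _ => f

def PHeap.push (h : PHeap) (x : Int) : PHeap :=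
  PHeap.meld (h.size + 1) h (.node x .leaf .leaf)

def PHeap.rootD : PHeap → Int
  | .leaf => 0
  | .node x _ _ => x

def PHeap.pop : PHeap → PHeap
  | .leaf => .leaf
  | .node _ a b => PHeap.meld (a.size + b.size) a b

-- the while loop of A: state is the heap and the count; fuel = initial heap size
def aloop : Nat → Int → PHeap → Int → Int
  | 0, K, h, count => if h.rootD ≥ K then count else -1
  | f + 1, K, h, count =>
    if h.size > 1 then
      if h.rootD ≥ K then count
      else
        let first := h.rootD
        let h1 := h.pop
        let second := h1.rootD
        let h2 := h1.pop
        aloop f K (h2.push (first + second * 2)) (count + 1)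
    else
      if h.rootD ≥ K then count else -1

def solution (scoville : List Int) (K : Int) : Int :=
  aloop scoville.length K (scoville.foldl (fun h x => h.push x) .leaf) 0

-- ===== PORT B =====
-- the while loop of B: state is the plain (unordered) list and the count;
-- fuel = initial length. min(foods) is PySem.List.min? (nonempty here, so the
-- .getD 0 default is unreachable); foods.remove(v) is PySem.List.remove? (v is
-- the minimum of a nonempty list, hence present, so its default is unreachable).
def bloop : Nat → Int → List Int → Int → Int
  | 0, K, foods, count => if foods.headD 0 ≥ K then count else -1
  | f + 1, K, foods, count =>
    if foods.length > 1 then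
      let first := (PySem.List.min? foods (fun x => x)).getD 0
      if first ≥ K then count
      else
        let foods1 := (PySem.List.remove? foods first).getD []
        let second := (PySem.List.min? foods1 (fun x => x)).getD 0
        let foods2 := (PySem.List.remove? foods1 second).getD []
        bloop f K (foods2 ++ [first + 2 * second]) (count + 1)
    else
      if foods.headD 0 ≥ K then count else -1

def solution_alt (scoville : List Int) (K : Int) : Int :=
  bloop scoville.length K scoville 0

-- ===== PRECONDITION & SPEC =====
-- Pre_ excludes only the empty list, on which both A and B raise IndexError at [0].
def Pre_solution (scoville : List Int) (K : Int) : Prop := scoville ≠ []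
instance (scoville : List Int) (K : Int) : Decidable (Pre_solution scoville K) := by unfold Pre_solution; infer_instance

def pvWitness_solution : List Int × Int := ([1, 2, 3, 9, 10, 12], 7)

def Spec_solution (scoville : List Int) (K : Int) (out : Int) : Prop := out = solution_alt scoville K
instance (scoville : List Int) (K : Int) (out : Int) : Decidable (Spec_solution scoville K out) := by unfold Spec_solution; infer_instance

-- ===== CLAIM (what is proved, stated in full; the proofs are below) =====
def Claim_equal_solution : Prop := ∀ (scoville : List Int) (K : Int), Dom_solution scoville K → Pre_solution scoville K → Spec_solution scoville K (solution scoville K)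

-- ===== LEMMAS AND PROOFS =====

-- Abstract reference process: the same merging on the SORTED list of values.
-- Both ports are proved equal to it (A via the heap's multiset, B via permutation).
def insort (x : Int) : List Int → List Int
  | [] => [x]
  | y :: ys => if x < y then x :: y :: ys else y :: insort x ys

def sloop : Nat → Int → List Int → Int → Int
  | 0, _K, s, count => if s.headD 0 ≥ _K then count else -1
  | f + 1, K, s, count =>
    match s with
    | s0 :: s1 :: rest =>
        if s0 ≥ K then count
        else sloop f K (insort (s0 + s1 * 2) rest) (count + 1)
    | [s0] => if s0 ≥ K then count else -1
    | [] => -1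

def PHeap.toMS : PHeap → Multiset Int
  | .leaf => 0
  | .node x a b => x ::ₘ (a.toMS + b.toMS)

def PHeap.IsHeap : PHeap → Prop
  | .leaf => True
  | .node x a b => (∀ y ∈ a.toMS, x ≤ y) ∧ (∀ y ∈ b.toMS, x ≤ y) ∧ a.IsHeap ∧ b.IsHeap

theorem PHeap.toMS_meld : ∀ (f : Nat) (h1 h2 : PHeap), h1.size + h2.size ≤ f →
    (PHeap.meld f h1 h2).toMS = h1.toMS + h2.toMS := by
  intro f
  induction f with
  | zero =>
    intro h1 h2 hf
    cases h1 with
    | leaf => simp [PHeap.meld, PHeap.toMS]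
    | node x a b =>
      cases h2 with
      | leaf => simp [PHeap.meld, PHeap.toMS]
      | node y c d => simp [PHeap.size] at hf
  | succ f ih =>
    intro h1 h2 hf
    cases h1 with
    | leaf => simp [PHeap.meld, PHeap.toMS]
    | node x a b =>
      cases h2 with
      | leaf => simp [PHeap.meld, PHeap.toMS]
      | node y c d =>
        simp only [PHeap.size] at hf
        simp only [PHeap.meld]
        split
        · rw [PHeap.toMS]
          rw [ih b (.node y c d) (by simp [PHeap.size]; omega)]
          simp only [PHeap.toMS, ← Multiset.singleton_add]
          abel
        · rw [PHeap.toMS]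
          rw [ih d (.node x a b) (by simp [PHeap.size]; omega)]
          simp only [PHeap.toMS, ← Multiset.singleton_add]
          abel

theorem PHeap.toMS_push (h : PHeap) (x : Int) : (h.push x).toMS = x ::ₘ h.toMS := by
  rw [PHeap.push, PHeap.toMS_meld (h.size + 1) h _ (by simp [PHeap.size])]
  simp only [PHeap.toMS, ← Multiset.singleton_add]
  abel

theorem PHeap.isHeap_meld : ∀ (f : Nat) (h1 h2 : PHeap), h1.size + h2.size ≤ f →
    h1.IsHeap → h2.IsHeap → (PHeap.meld f h1 h2).IsHeap := by
  intro f
  induction f with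
  | zero =>
    intro h1 h2 hf H1 H2
    cases h1 with
    | leaf => simpa [PHeap.meld] using H2
    | node x a b =>
      cases h2 with
      | leaf => simpa [PHeap.meld] using H1
      | node y c d => simp [PHeap.size] at hf
  | succ f ih =>
    intro h1 h2 hf H1 H2
    cases h1 with
    | leaf => simpa [PHeap.meld] using H2
    | node x a b =>
      cases h2 with
      | leaf => simpa [PHeap.meld] using H1
      | node y c d =>
        simp only [PHeap.size] at hf
        obtain ⟨ha1, ha2, ha3, ha4⟩ := H1
        obtain ⟨hb1, hb2, hb3, hb4⟩ := H2
        simp only [PHeap.meld]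
        split
        · refine ⟨?_, ha1, ih b (.node y c d) (by simp [PHeap.size]; omega) ha4 ⟨hb1, hb2, hb3, hb4⟩, ha3⟩
          intro z hz
          rw [PHeap.toMS_meld f b (.node y c d) (by simp [PHeap.size]; omega)] at hz
          simp only [Multiset.mem_add, PHeap.toMS, Multiset.mem_cons] at hz
          rcases hz with hz | hz | hz
          · exact ha2 z hz
          · omega
          · rcases hz with hz | hz
            · exact le_trans (by omega) (hb1 z hz)
            · exact le_trans (by omega) (hb2 z hz)
        · refine ⟨?_, hb1, ih d (.node x a b) (by simp [PHeap.size]; omega) hb4 ⟨ha1, ha2, ha3, ha4⟩, hb3⟩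
          intro z hz
          rw [PHeap.toMS_meld f d (.node x a b) (by simp [PHeap.size]; omega)] at hz
          simp only [Multiset.mem_add, PHeap.toMS, Multiset.mem_cons] at hz
          rcases hz with hz | hz | hz
          · exact hb2 z hz
          · omega
          · rcases hz with hz | hz
            · exact le_trans (by omega) (ha1 z hz)
            · exact le_trans (by omega) (ha2 z hz)

theorem PHeap.isHeap_push (h : PHeap) (x : Int) (H : h.IsHeap) : (h.push x).IsHeap := by
  exact PHeap.isHeap_meld (h.size + 1) h _ (by simp [PHeap.size]) H
    ⟨by simp [PHeap.toMS], by simp [PHeap.toMS], trivial, trivial⟩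

theorem PHeap.rootD_le (h : PHeap) (H : h.IsHeap) : ∀ y ∈ h.toMS, h.rootD ≤ y := by
  cases h with
  | leaf => simp [PHeap.toMS]
  | node x a b =>
    obtain ⟨h1, h2, _, _⟩ := H
    intro y hy
    simp only [PHeap.toMS, Multiset.mem_cons, Multiset.mem_add] at hy
    rcases hy with hy | hy | hy
    · simp [PHeap.rootD, hy]
    · exact h1 y hy
    · exact h2 y hy

theorem PHeap.card_toMS (h : PHeap) : h.toMS.card = h.size := by
  induction h with
  | leaf => simp [PHeap.toMS, PHeap.size]
  | node x a b iha ihb => simp [PHeap.toMS, PHeap.size, iha, ihb]; omega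

-- a nonempty heap whose multiset is a sorted list: the root is the head, and popping
-- leaves exactly the tail (as a multiset)
theorem heap_head_pop (h : PHeap) (H : h.IsHeap) (s0 : Int) (t : List Int)
    (hms : h.toMS = ↑(s0 :: t)) (hsort : (s0 :: t).Pairwise (· ≤ ·)) :
    h.rootD = s0 ∧ h.pop.toMS = ↑t ∧ h.pop.IsHeap := by
  cases h with
  | leaf =>
    have hcard := congrArg Multiset.card hms
    simp [PHeap.toMS] at hcard
  | node x a b =>
    have hx : x = s0 := by
      have hxmem : x ∈ (↑(s0 :: t) : Multiset Int) := by
        rw [← hms]; simp [PHeap.toMS]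
      have hs0mem : (s0 : Int) ∈ PHeap.toMS (.node x a b) := by
        rw [hms]; simp
      have h1 : s0 ≤ x := by
        rcases Multiset.mem_coe.mp hxmem with hx
        rcases List.mem_cons.mp hx with hx | hx
        · omega
        · exact (List.pairwise_cons.mp hsort).1 x hx
      have h2 : x ≤ s0 := PHeap.rootD_le _ H s0 hs0mem
      omega
    subst hx
    obtain ⟨_, _, ha, hb⟩ := H
    have htail : a.toMS + b.toMS = ↑t := by
      have hx : x ::ₘ (a.toMS + b.toMS) = x ::ₘ (↑t : Multiset Int) := by
        simpa [PHeap.toMS, ← Multiset.cons_coe] using hms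
      exact (Multiset.cons_inj_right x).mp hx
    refine ⟨rfl, ?_, ?_⟩
    · rw [PHeap.pop, PHeap.toMS_meld (a.size + b.size) a b (le_refl _), htail]
    · rw [PHeap.pop]
      exact PHeap.isHeap_meld (a.size + b.size) a b (le_refl _) ha hb

theorem length_insort (x : Int) (l : List Int) : (insort x l).length = l.length + 1 := by
  induction l with
  | nil => simp [insort]
  | cons y ys ih => simp only [insort]; split <;> simp [ih]

theorem insort_perm (x : Int) (l : List Int) : (insort x l).Perm (x :: l) := by
  induction l with
  | nil => simp [insort]
  | cons y ys ih =>
    simp only [insort]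
    split
    · exact List.Perm.refl _
    · exact ((ih.cons y).trans (List.Perm.swap x y ys))

theorem insort_sorted (x : Int) (l : List Int) (hl : l.Pairwise (· ≤ ·)) :
    (insort x l).Pairwise (· ≤ ·) := by
  induction l with
  | nil => simp [insort]
  | cons y ys ih =>
    obtain ⟨hy, hys⟩ := List.pairwise_cons.mp hl
    simp only [insort]
    split
    · refine List.pairwise_cons.mpr ⟨?_, hl⟩
      intro z hz
      rcases List.mem_cons.mp hz with hz | hz
      · omega
      · have := hy z hz; omega
    · refine List.pairwise_cons.mpr ⟨?_, ih hys⟩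
      intro z hz
      rcases (insort_perm x ys).mem_iff.mp hz with hz
      rcases List.mem_cons.mp hz with hz | hz
      · omega
      · exact hy z hz

-- A's loop equals the sorted-list reference process.
theorem aloop_eq_sloop : ∀ (f : Nat) (h : PHeap) (s : List Int) (count K : Int),
    s ≠ [] → s.length ≤ f + 1 → h.IsHeap → s.Pairwise (· ≤ ·) → h.toMS = ↑s →
    aloop f K h count = sloop f K s count := by
  intro f
  induction f with
  | zero =>
    intro h s count K hne hlen H hsort hms
    match s with
    | [] => exact absurd rfl hne
    | [s0] =>
      obtain ⟨hroot, _, _⟩ := heap_head_pop h H s0 [] hms hsort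
      simp [aloop, sloop, hroot]
    | s0 :: s1 :: rest => simp at hlen
  | succ f ih =>
    intro h s count K hne hlen H hsort hms
    have hsize : h.size = s.length := by
      rw [← PHeap.card_toMS, hms, Multiset.coe_card]
    match s with
    | [] => exact absurd rfl hne
    | [s0] =>
      obtain ⟨hroot, _, _⟩ := heap_head_pop h H s0 [] hms hsort
      simp [aloop, sloop, hsize, hroot]
    | s0 :: s1 :: rest =>
      obtain ⟨hroot, hpop, Hpop⟩ := heap_head_pop h H s0 (s1 :: rest) hms hsort
      have hgt : h.size > 1 := by simp [hsize]
      simp only [aloop, sloop, hgt, if_pos, hroot]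
      by_cases hK : s0 ≥ K
      · simp [hK]
      · rw [if_neg hK, if_neg hK]
        have hsort' : (s1 :: rest).Pairwise (· ≤ ·) := (List.pairwise_cons.mp hsort).2
        obtain ⟨hroot2, hpop2, Hpop2⟩ := heap_head_pop h.pop Hpop s1 rest hpop hsort'
        rw [hroot2]
        have hms' : (h.pop.pop.push (s0 + s1 * 2)).toMS = ↑(insort (s0 + s1 * 2) rest) := by
          rw [PHeap.toMS_push, hpop2]
          exact (Multiset.coe_eq_coe.mpr (insort_perm _ rest)).symm
        have hlen' : (insort (s0 + s1 * 2) rest).length ≤ f + 1 := by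
          rw [length_insort]
          simp at hlen
          omega
        refine ih _ _ _ _ ?_ hlen' (PHeap.isHeap_push _ _ Hpop2) ?_ hms'
        · intro hcontra
          have := length_insort (s0 + s1 * 2) rest
          simp [hcontra] at this
        · exact insort_sorted _ _ (List.pairwise_cons.mp hsort').2

theorem toMS_foldl_push (l : List Int) : ∀ (h : PHeap),
    (l.foldl (fun h x => h.push x) h).toMS = h.toMS + ↑l := by
  induction l with
  | nil => simp
  | cons x xs ih =>
    intro h
    simp only [List.foldl_cons, ih, PHeap.toMS_push, ← Multiset.cons_coe,
      ← Multiset.singleton_add]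
    abel

theorem isHeap_foldl_push (l : List Int) : ∀ (h : PHeap), h.IsHeap →
    (l.foldl (fun h x => h.push x) h).IsHeap := by
  induction l with
  | nil => intro h H; exact H
  | cons x xs ih => intro x_ H; exact ih _ (PHeap.isHeap_push x_ x H)

-- min of an unordered list that is a permutation of a sorted nonempty list is the head
theorem min_of_perm (foods : List Int) (s0 : Int) (t : List Int)
    (hperm : foods.Perm (s0 :: t)) (hsort : (s0 :: t).Pairwise (· ≤ ·)) :
    (PySem.List.min? foods (fun x => x)).getD 0 = s0 := by
  obtain ⟨m, hm⟩ : ∃ m, PySem.List.min? foods (fun x => x) = some m := by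
    match foods, hperm with
    | [], hperm => exact absurd hperm.symm (by simp)
    | x :: t, _ => exact ⟨t.foldl min x, PySem.List.min?_id_cons x t⟩
  have hmem : m ∈ foods := PySem.List.min?_mem hm
  have hmem' : m ∈ s0 :: t := hperm.mem_iff.mp hmem
  have hs0 : s0 ∈ foods := hperm.mem_iff.mpr (by simp)
  have h1 : m ≤ s0 := PySem.List.min?_isMin hm s0 hs0
  have h2 : s0 ≤ m := by
    rcases List.mem_cons.mp hmem' with h | h
    · omega
    · exact (List.pairwise_cons.mp hsort).1 m h
  rw [hm]
  simp
  omega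

-- B's loop equals the sorted-list reference process.
theorem bloop_eq_sloop : ∀ (f : Nat) (foods s : List Int) (count K : Int),
    s ≠ [] → s.length ≤ f + 1 → foods.Perm s → s.Pairwise (· ≤ ·) →
    bloop f K foods count = sloop f K s count := by
  intro f
  induction f with
  | zero =>
    intro foods s count K hne hlen hperm hsort
    match s with
    | [] => exact absurd rfl hne
    | [s0] =>
      have : foods = [s0] := List.perm_singleton.mp hperm
      subst this
      simp [bloop, sloop]
    | s0 :: s1 :: rest => simp at hlen
  | succ f ih =>
    intro foods s count K hne hlen hperm hsort
    have hlen2 : foods.length = s.length := hperm.length_eq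
    match s with
    | [] => exact absurd rfl hne
    | [s0] =>
      have : foods = [s0] := List.perm_singleton.mp hperm
      subst this
      simp [bloop, sloop]
    | s0 :: s1 :: rest =>
      have hgt : foods.length > 1 := by simp [hlen2]
      have hmin1 : (PySem.List.min? foods (fun x => x)).getD 0 = s0 :=
        min_of_perm foods s0 (s1 :: rest) hperm hsort
      simp only [bloop, sloop, hgt, if_pos, hmin1]
      by_cases hK : s0 ≥ K
      · simp [hK]
      · rw [if_neg hK, if_neg hK]
        have hs0mem : s0 ∈ foods := hperm.mem_iff.mpr (by simp)
        have hrem1 : PySem.List.remove? foods s0 = some (foods.erase s0) :=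
          PySem.List.remove?_eq_some_erase foods s0 hs0mem
        have hperm1 : (foods.erase s0).Perm (s1 :: rest) := by
          have := hperm.erase s0
          simpa using this
        have hsort1 : (s1 :: rest).Pairwise (· ≤ ·) := (List.pairwise_cons.mp hsort).2
        have hmin2 : (PySem.List.min? (foods.erase s0) (fun x => x)).getD 0 = s1 :=
          min_of_perm _ s1 rest hperm1 hsort1
        have hs1mem : s1 ∈ foods.erase s0 := hperm1.mem_iff.mpr (by simp)
        have hrem2 : PySem.List.remove? (foods.erase s0) s1 = some ((foods.erase s0).erase s1) :=
          PySem.List.remove?_eq_some_erase (foods.erase s0) s1 hs1mem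
        have hperm2 : ((foods.erase s0).erase s1).Perm rest := by
          have := hperm1.erase s1
          simpa using this
        rw [hrem1]
        simp only [Option.getD_some, hmin2, hrem2]
        have hperm3 : (((foods.erase s0).erase s1) ++ [s0 + 2 * s1]).Perm
            (insort (s0 + s1 * 2) rest) := by
          have h2 : (s0 + 2 * s1) = (s0 + s1 * 2) := by ring
          rw [h2]
          exact ((List.perm_append_singleton _ _).trans
            (hperm2.cons _)).trans (insort_perm _ rest).symm
        have hlen' : (insort (s0 + s1 * 2) rest).length ≤ f + 1 := by
          rw [length_insort]
          simp at hlen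
          omega
        refine ih _ _ _ _ ?_ hlen' hperm3 (insort_sorted _ _ (List.pairwise_cons.mp hsort1).2)
        intro hcontra
        have := length_insort (s0 + s1 * 2) rest
        simp [hcontra] at this

-- ===== VERDICT (by name: the statement is the Claim_ definition above) =====
theorem solution_spec : Claim_equal_solution := by
  intro scoville K _ hpre
  unfold Spec_solution solution solution_alt
  have hperm : (PySem.List.sorted scoville (fun x => x) false).Perm scoville :=
    PySem.List.sorted_perm scoville (fun x => x) false
  have hne : PySem.List.sorted scoville (fun x => x) false ≠ [] := by
    intro hnil
    exact hpre (List.Perm.eq_nil (hnil ▸ hperm.symm))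
  have hlen : (PySem.List.sorted scoville (fun x => x) false).length ≤ scoville.length + 1 := by
    rw [hperm.length_eq]; omega
  have hsort : (PySem.List.sorted scoville (fun x => x) false).Pairwise (· ≤ ·) := by
    simpa using PySem.List.sorted_pairwise scoville (fun x => x)
  rw [aloop_eq_sloop scoville.length _ _ 0 K hne hlen
      (isHeap_foldl_push scoville .leaf trivial) hsort
      (by rw [toMS_foldl_push]; simp [PHeap.toMS]; exact hperm.symm),
    bloop_eq_sloop scoville.length scoville _ 0 K hne hlen hperm.symm hsort]
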